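-- pv_equiv track=rewrite | github.com/mominmasood39/LegalMind-AI | rag_engine.py | is_non_legal_query
-- ===== SOURCE A (Python) =====
-- def is_non_legal_query(text: str):
--     """Detect clearly non-legal or gibberish inputs"""
--     text = text.lower().strip()
--     if len(text.split()) < 3:
--         return True
--
--     legal_keywords = [
--         # General legal terms
--         "law", "legal", "section", "punishment", "fir", "police",
--         "court", "bail", "case", "rights", "ppc", "crpc",
--         "constitution", "crime", "complaint", "harassment",
--         "notice", "summons", "warrant", "hearing", "trial",
--         "advocate", "lawyer", "judge", "magistrate",
--
--         # Common incidents and offenses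
--         "theft", "stolen", "steal", "robbery", "burglary",
--         "assault", "fight", "kidnap", "abduction", "fraud",
--         "forgery", "cheque", "cyber", "blackmail", "extortion",
--         "rape", "molestation", "domestic", "violence",
--         "property", "tenant", "rent", "landlord", "eviction",
--         "divorce", "khula", "maintenance", "custody", "nikah",
--         "inheritance", "will", "contract", "agreement", "salary",
--         "termination", "work", "employer", "employee"
--     ]
--
--     return not any(word in text for word in legal_keywords)
-- ===== SOURCE B (Python) =====
-- # keywords kept as one space-separated string, split once at import time
-- _LEGAL_KEYWORDS = (
--     "law legal section punishment fir police "
--     "court bail case rights ppc crpc "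
--     "constitution crime complaint harassment "
--     "notice summons warrant hearing trial "
--     "advocate lawyer judge magistrate "
--     "theft stolen steal robbery burglary "
--     "assault fight kidnap abduction fraud "
--     "forgery cheque cyber blackmail extortion "
--     "rape molestation domestic violence "
--     "property tenant rent landlord eviction "
--     "divorce khula maintenance custody nikah "
--     "inheritance will contract agreement salary "
--     "termination work employer employee"
-- ).split()
--
--
-- def is_non_legal_query(text: str):
--     """Detect clearly non-legal or gibberish inputs"""
--     text = text.lower().strip()
--     if len(text.split()) < 3:
--         return True
--     # position-major scan: walk the text once and at each position check
--     # whether some keyword starts there (instead of one full substring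
--     # search of the text per keyword)
--     for i in range(len(text)):
--         for w in _LEGAL_KEYWORDS:
--             if text.startswith(w, i):
--                 return False
--     return True
-- ===== Notes on version B (the rewrite author's own statement) =====
-- stated objective: alternative
-- what changed: Replaces the keyword-major loop that runs one full substring scan of the text per keyword with a single position-major scan of the text that checks at each position whether some keyword starts there; the keyword table is kept as one space-separated string split once instead of a 70-element list literal.
import Mathlib
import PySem

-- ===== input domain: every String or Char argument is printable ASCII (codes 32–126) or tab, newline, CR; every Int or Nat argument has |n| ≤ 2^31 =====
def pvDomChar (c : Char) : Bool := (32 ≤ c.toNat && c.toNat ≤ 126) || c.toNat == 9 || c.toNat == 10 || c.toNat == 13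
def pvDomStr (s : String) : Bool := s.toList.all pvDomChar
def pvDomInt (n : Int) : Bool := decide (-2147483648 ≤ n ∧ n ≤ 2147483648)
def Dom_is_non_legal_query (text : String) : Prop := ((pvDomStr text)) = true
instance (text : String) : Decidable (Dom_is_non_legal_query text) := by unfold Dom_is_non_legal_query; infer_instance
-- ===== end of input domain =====

-- B replaces the keyword-major loop of substring scans by one position-major scan
-- checking prefix matches at each position, with the keyword table kept as a single
-- space-separated string split once (objective: alternative).

-- ===== PORT A =====
def legalKeywordsA : List String := [
  "law", "legal", "section", "punishment", "fir", "police",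
  "court", "bail", "case", "rights", "ppc", "crpc",
  "constitution", "crime", "complaint", "harassment",
  "notice", "summons", "warrant", "hearing", "trial",
  "advocate", "lawyer", "judge", "magistrate",
  "theft", "stolen", "steal", "robbery", "burglary",
  "assault", "fight", "kidnap", "abduction", "fraud",
  "forgery", "cheque", "cyber", "blackmail", "extortion",
  "rape", "molestation", "domestic", "violence",
  "property", "tenant", "rent", "landlord", "eviction",
  "divorce", "khula", "maintenance", "custody", "nikah",
  "inheritance", "will", "contract", "agreement", "salary",
  "termination", "work", "employer", "employee"]

def is_non_legal_query (text : String) : Bool :=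
  let t := PySem.Str.strip (PySem.Str.lower text)
  if (PySem.Str.split₀ t).length < 3 then true
  else !(legalKeywordsA.any (fun w => PySem.Str.isIn w t))

-- ===== PORT B =====
-- Source B keeps the keywords as one space-separated string and splits it once
def legalKeywordsB : List String := PySem.Str.split₀
  ("law legal section punishment fir police court bail case rights ppc crpc constitution crime complaint harassment notice summons warrant hearing trial advocate lawyer judge magistrate theft stolen steal robbery burglary assault fight kidnap abduction fraud forgery cheque cyber blackmail extortion rape molestation domestic violence property tenant rent landlord eviction divorce khula maintenance custody nikah inheritance will contract agreement salary termination work employer employee")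

-- text.startswith(w, i) with 0 ≤ i is exact as Chars.startswith on the i-th suffix
def is_non_legal_query_alt (text : String) : Bool :=
  let t := PySem.Str.strip (PySem.Str.lower text)
  if (PySem.Str.split₀ t).length < 3 then true
  else !((PySem.List.pyRange 0 (PySem.Str.len t) 1).any (fun i =>
    legalKeywordsB.any (fun w => PySem.Chars.startswith (t.toList.drop i.toNat) w.toList)))

-- ===== PRECONDITION & SPEC =====
def Spec_is_non_legal_query (text : String) (out : Bool) : Prop := out = is_non_legal_query_alt text
instance (text : String) (out : Bool) : Decidable (Spec_is_non_legal_query text out) := by unfold Spec_is_non_legal_query; infer_instance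

-- ===== CLAIM (what is proved, stated in full; the proofs are below) =====
def Claim_equal_is_non_legal_query : Prop := ∀ (text : String), Dom_is_non_legal_query text → Spec_is_non_legal_query text (is_non_legal_query text)

-- ===== LEMMAS AND PROOFS =====

set_option maxRecDepth 8000 in
set_option maxHeartbeats 4000000 in
lemma keywords_eq : legalKeywordsB = legalKeywordsA := by decide

lemma legalKeywordsA_ne_nil : ∀ w ∈ legalKeywordsA, w.toList ≠ [] := by decide

-- the two scans find a keyword occurrence under the same circumstances
lemma scan_eq (t : String) :
    (legalKeywordsA.any (fun w => PySem.Str.isIn w t)) =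
    ((PySem.List.pyRange 0 (PySem.Str.len t) 1).any (fun i =>
      legalKeywordsB.any (fun w => PySem.Chars.startswith (t.toList.drop i.toNat) w.toList))) := by
  rw [keywords_eq, Bool.eq_iff_iff]
  simp only [List.any_eq_true, PySem.Str.isIn_iff_infix, PySem.Chars.startswith_iff,
    PySem.List.mem_pyRange_one]
  constructor
  · rintro ⟨w, hw, hinf⟩
    obtain ⟨j, hj⟩ := (PySem.Chars.exists_prefix_drop_iff_isIn w.toList t.toList).mpr
      ((PySem.Chars.isIn_iff_infix w.toList t.toList).mpr hinf)
    have hjlt : j < t.toList.length := by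
      by_contra h
      have : t.toList.drop j = [] := List.drop_eq_nil_of_le (by omega)
      rw [this] at hj
      exact legalKeywordsA_ne_nil w hw (List.prefix_nil.mp hj)
    refine ⟨(j : Int), ⟨by omega, ?_⟩, w, hw, by simpa using hj⟩
    simp [PySem.Str.len_eq]
    exact_mod_cast hjlt
  · rintro ⟨i, _, w, hw, hpre⟩
    exact ⟨w, hw, hpre.isInfix.trans (List.drop_suffix _ _).isInfix⟩

-- ===== VERDICT (by name: the statement is the Claim_ definition above) =====
theorem is_non_legal_query_spec : Claim_equal_is_non_legal_query := by
  intro text _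
  unfold Spec_is_non_legal_query is_non_legal_query is_non_legal_query_alt
  simp only [scan_eq]
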